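-- pv_equiv track=rewrite | github.com/GreenTrafficLight/IDAS-Model-Importer | utils.py | StripToTriangle
-- ===== SOURCE A (Python) =====
-- def StripToTriangle(triangleStripList):
--     faces = []
--     cte = 0
--     for i in range(2, len(triangleStripList)):
--         if triangleStripList[i] == 65535 or triangleStripList[i - 1] == 65535 or triangleStripList[i - 2] == 65535:
--             if i % 2 == 0:
--                 cte = -1
--             else:
--                 cte = 0
--             pass
--         else:
--             if (i + cte) % 2 == 0:
--                 a = triangleStripList[i - 2]
--                 b = triangleStripList[i - 1]
--                 c = triangleStripList[i]
--             else:
--                 a = triangleStripList[i - 1]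
--                 b = triangleStripList[i - 2]
--                 c = triangleStripList[i]
--
--             if a != b and b != c and c != a:
--                 faces.append([a, b, c])
--     return faces
-- ===== SOURCE B (Python) =====
-- def StripToTriangle(triangleStripList):
--     # Split the strip into maximal runs separated by the 65535 restart marker,
--     # then emit each run's triangles with the standard strip alternation.
--     segments = []
--     current = []
--     for v in triangleStripList:
--         if v == 65535:
--             segments.append(current)
--             current = []
--         else:
--             current.append(v)
--     segments.append(current)
--     faces = []
--     for seg in segments:
--         for k, (a, b, c) in enumerate(zip(seg, seg[1:], seg[2:])):
--             if k % 2 == 1: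
--                 a, b = b, a
--             if a != b and b != c and c != a:
--                 faces.append([a, b, c])
--     return faces
-- ===== Notes on version B (the rewrite author's own statement) =====
-- stated objective: simpler
-- what changed: Replaces the single stateful index loop with its parity-correction variable cte by a partition of the strip into maximal runs separated by the 65535 restart marker, then a plain sliding-window pass with local parity k over each run.
import Mathlib
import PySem

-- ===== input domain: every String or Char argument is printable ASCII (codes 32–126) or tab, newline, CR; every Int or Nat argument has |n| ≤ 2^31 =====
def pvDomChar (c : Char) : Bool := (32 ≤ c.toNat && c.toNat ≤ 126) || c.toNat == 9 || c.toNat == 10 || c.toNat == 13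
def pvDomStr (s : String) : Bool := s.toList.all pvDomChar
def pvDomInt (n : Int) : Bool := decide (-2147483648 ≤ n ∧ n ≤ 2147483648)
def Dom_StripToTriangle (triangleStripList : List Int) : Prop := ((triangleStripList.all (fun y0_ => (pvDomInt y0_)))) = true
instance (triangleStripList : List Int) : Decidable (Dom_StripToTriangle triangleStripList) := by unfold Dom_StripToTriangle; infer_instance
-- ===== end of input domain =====

-- B replaces A's stateful index loop (with the parity-correction variable cte) by
-- split-into-runs-at-65535 followed by a sliding-window pass per run; same output, same cost.

-- ===== PORT A =====
-- the loop 'for i in range(2, len(xs))' with state (cte, faces); all indices i, i-1, i-2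
-- are nonnegative and in range here, so xs[i] is ported with the total pyGetD.
def loopA (xs : List Int) (i : Nat) (cte : Int) (faces : List (List Int)) : List (List Int) :=
  if _h : i < xs.length then
    if PySem.List.pyGetD xs (i : Int) 0 = 65535 ∨ PySem.List.pyGetD xs ((i : Int) - 1) 0 = 65535 ∨
        PySem.List.pyGetD xs ((i : Int) - 2) 0 = 65535 then
      loopA xs (i + 1) (if i % 2 = 0 then -1 else 0) faces
    else
      let a := if PySem.Int.mod ((i : Int) + cte) 2 = 0 then PySem.List.pyGetD xs ((i : Int) - 2) 0
               else PySem.List.pyGetD xs ((i : Int) - 1) 0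
      let b := if PySem.Int.mod ((i : Int) + cte) 2 = 0 then PySem.List.pyGetD xs ((i : Int) - 1) 0
               else PySem.List.pyGetD xs ((i : Int) - 2) 0
      let c := PySem.List.pyGetD xs (i : Int) 0
      loopA xs (i + 1) cte (if a ≠ b ∧ b ≠ c ∧ c ≠ a then faces ++ [[a, b, c]] else faces)
  else faces
termination_by xs.length - i

def StripToTriangle (triangleStripList : List Int) : List (List Int) :=
  loopA triangleStripList 2 0 []

-- ===== PORT B =====
-- first loop of B: split into maximal runs separated by 65535 ('current' accumulates in order)
def segsGo : List Int → List Int → List (List Int)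
  | [], cur => [cur]
  | v :: r, cur => if v = 65535 then cur :: segsGo r [] else segsGo r (cur ++ [v])

-- second loop of B: 'for k, (a, b, c) in enumerate(zip(seg, seg[1:], seg[2:]))'
def triOfSeg : List Int → Nat → List (List Int)
  | a :: b :: c :: r, k =>
      let a' := if k % 2 = 1 then b else a
      let b' := if k % 2 = 1 then a else b
      (if a' ≠ b' ∧ b' ≠ c ∧ c ≠ a' then [[a', b', c]] else []) ++ triOfSeg (b :: c :: r) (k + 1)
  | _, _ => []

def StripToTriangle_alt (triangleStripList : List Int) : List (List Int) :=
  (segsGo triangleStripList []).flatMap (fun seg => triOfSeg seg 0)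

-- ===== PRECONDITION & SPEC =====
def Spec_StripToTriangle (triangleStripList : List Int) (out : List (List Int)) : Prop := out = StripToTriangle_alt triangleStripList
instance (triangleStripList : List Int) (out : List (List Int)) : Decidable (Spec_StripToTriangle triangleStripList out) := by unfold Spec_StripToTriangle; infer_instance

-- ===== CLAIM (what is proved, stated in full; the proofs are below) =====
def Claim_equal_StripToTriangle : Prop := ∀ (triangleStripList : List Int), Dom_StripToTriangle triangleStripList → Spec_StripToTriangle triangleStripList (StripToTriangle triangleStripList)

-- ===== LEMMAS AND PROOFS =====

-- window form of A's loop: state = (last-two vertices, swap flag)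
def wA : Int → Int → Bool → List Int → List (List Int)
  | _, _, _, [] => []
  | p, q, s, c :: r =>
      if c = 65535 ∨ q = 65535 ∨ p = 65535 then wA q c false r
      else
        (if (if s then q else p) ≠ (if s then p else q) ∧ (if s then p else q) ≠ c ∧ c ≠ (if s then q else p)
         then [[if s then q else p, if s then p else q, c]] else []) ++ wA q c (!s) r

-- current run prefix, and the segments after the first 65535
def runT (l : List Int) : List Int := l.takeWhile (fun v => v ≠ 65535)

def tailSegs : List Int → List (List Int)
  | [] => []
  | v :: r => if v = 65535 then segsGo r [] else tailSegs r

def restF (l : List Int) : List (List Int) := (tailSegs l).flatMap (fun seg => triOfSeg seg 0)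

theorem segsGo_eq (l : List Int) : ∀ cur, segsGo l cur = (cur ++ runT l) :: tailSegs l := by
  induction l with
  | nil => intro cur; simp [segsGo, runT, tailSegs]
  | cons v r ih =>
      intro cur
      by_cases hv : v = 65535
      · simp [segsGo, runT, tailSegs, hv]
      · simp [segsGo, runT, tailSegs, hv, ih, List.append_assoc]

theorem alt_eq (xs : List Int) :
    StripToTriangle_alt xs = triOfSeg (runT xs) 0 ++ restF xs := by
  simp [StripToTriangle_alt, segsGo_eq, restF]

theorem wA_master (rest : List Int) :
    (∀ p q k, p ≠ 65535 → q ≠ 65535 →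
        wA p q (decide (k % 2 = 1)) rest = triOfSeg (p :: q :: runT rest) k ++ restF rest)
    ∧ (∀ x : Int, wA x 65535 false rest = triOfSeg (runT rest) 0 ++ restF rest)
    ∧ (∀ d : Int, d ≠ 65535 → wA 65535 d false rest = triOfSeg (d :: runT rest) 0 ++ restF rest) := by
  induction rest with
  | nil =>
      refine ⟨?_, ?_, ?_⟩
      · intro p q k _ _; simp [wA, runT, restF, tailSegs, triOfSeg]
      · intro x; simp [wA, runT, restF, tailSegs, triOfSeg]
      · intro d _; simp [wA, runT, restF, tailSegs, triOfSeg]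
  | cons c r ih =>
      obtain ⟨ih1, ih2, ih3⟩ := ih
      have hrestF_marker : restF (65535 :: r) = triOfSeg (runT r) 0 ++ restF r := by
        simp [restF, tailSegs, segsGo_eq]
      refine ⟨?_, ?_, ?_⟩
      · intro p q k hp hq
        by_cases hc : c = 65535
        · subst hc
          rw [wA, if_pos (Or.inl rfl), ih2 q]
          simp [runT, triOfSeg, hrestF_marker]
        · rw [wA, if_neg (by simp [hc, hp, hq])]
          have hflip : (!decide (k % 2 = 1)) = decide ((k + 1) % 2 = 1) := by
            rcases Nat.mod_two_eq_zero_or_one k with h | h <;>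
              simp [h, Nat.add_mod]
          rw [hflip, ih1 q c (k + 1) hq hc]
          have hT : runT (c :: r) = c :: runT r := by simp [runT, hc]
          have hrF : restF (c :: r) = restF r := by simp [restF, tailSegs, hc]
          rw [hT, hrF]
          conv_rhs => rw [triOfSeg]
          simp [List.append_assoc]
      · intro x
        rw [wA, if_pos (Or.inr (Or.inl rfl))]
        by_cases hc : c = 65535
        · subst hc
          rw [ih2 65535]
          simp [runT, triOfSeg, hrestF_marker]
        · rw [ih3 c hc]
          simp [runT, restF, tailSegs, hc]
      · intro d hd
        rw [wA, if_pos (Or.inr (Or.inr rfl))]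
        by_cases hc : c = 65535
        · subst hc
          rw [ih2 d]
          simp [runT, triOfSeg, hrestF_marker]
        · have h0 : (false : Bool) = decide (0 % 2 = 1) := by decide
          rw [h0, ih1 d c 0 hd hc]
          simp [runT, restF, tailSegs, hc, triOfSeg]

theorem loopA_eq_wA (tail : List Int) : ∀ (xs : List Int) (i : Nat) (cte : Int) (acc : List (List Int)),
    2 ≤ i → xs.drop i = tail → (cte = 0 ∨ cte = -1) →
    loopA xs i cte acc =
      acc ++ wA (xs.getD (i - 2) 0) (xs.getD (i - 1) 0) (decide (((i : Int) + cte) % 2 = 1)) tail := by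
  induction tail with
  | nil =>
      intro xs i cte acc hi hdrop _
      have hlen : xs.length ≤ i := by
        by_contra h
        have := List.drop_eq_nil_iff.mp hdrop
        omega
      rw [loopA, dif_neg (by omega)]
      simp [wA]
  | cons c rest ihtail =>
      intro xs i cte acc hi hdrop hcte
      have hlt : i < xs.length := by
        by_contra h
        rw [List.drop_eq_nil_of_le (by omega)] at hdrop
        simp at hdrop
      have hgi : xs.getD i 0 = c := by
        have h1 : (xs.drop i).head? = some c := by rw [hdrop]; rfl
        rw [List.head?_drop] at h1
        simp [List.getD_eq_getElem?_getD, h1]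
      have hdrop' : xs.drop (i + 1) = rest := by
        have h2 : xs.drop (i + 1) = (xs.drop i).drop 1 := by rw [List.drop_drop]
        rw [h2, hdrop]
        rfl
      have e2 : ((i : Int) - 2) = ((i - 2 : Nat) : Int) := by omega
      have e1 : ((i : Int) - 1) = ((i - 1 : Nat) : Int) := by omega
      have g0 : PySem.List.pyGetD xs (i : Int) 0 = c := by
        rw [PySem.List.pyGetD_natCast]; exact hgi
      have g1 : PySem.List.pyGetD xs ((i : Int) - 1) 0 = xs.getD (i - 1) 0 := by
        rw [e1, PySem.List.pyGetD_natCast]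
      have g2 : PySem.List.pyGetD xs ((i : Int) - 2) 0 = xs.getD (i - 2) 0 := by
        rw [e2, PySem.List.pyGetD_natCast]
      have en1 : i + 1 - 1 = i := by omega
      have en2 : i + 1 - 2 = i - 1 := by omega
      rw [loopA, dif_pos hlt, g0, g1, g2]
      by_cases hdirty : c = 65535 ∨ xs.getD (i - 1) 0 = 65535 ∨ xs.getD (i - 2) 0 = 65535
      · rw [if_pos hdirty]
        have hcte' : (if i % 2 = 0 then (-1 : Int) else 0) = 0 ∨ (if i % 2 = 0 then (-1 : Int) else 0) = -1 := by
          split <;> simp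
        rw [ihtail xs (i + 1) _ acc (by omega) hdrop' hcte']
        have hflag : ¬ ((((i + 1 : Nat)) : Int) + (if i % 2 = 0 then (-1 : Int) else 0)) % 2 = 1 := by
          rcases Nat.mod_two_eq_zero_or_one i with h | h
          · rw [if_pos h]; push_cast; omega
          · rw [if_neg (by omega)]; push_cast; omega
        rw [en1, en2, decide_eq_false hflag, hgi]
        conv_rhs => rw [wA, if_pos hdirty]
      · rw [if_neg hdirty]
        have hmod : PySem.Int.mod ((i : Int) + cte) 2 = ((i : Int) + cte) % 2 :=
          PySem.Int.mod_eq_emod_of_pos (by omega)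
        rw [hmod, ihtail xs (i + 1) cte _ (by omega) hdrop' hcte, en1, en2, hgi]
        conv_rhs => rw [wA, if_neg hdirty]
        by_cases hm : ((i : Int) + cte) % 2 = 1
        · have hmz : ¬ ((i : Int) + cte) % 2 = 0 := by omega
          have h2 : ¬ ((((i + 1 : Nat)) : Int) + cte) % 2 = 1 := by push_cast; omega
          simp only [if_neg hmz, decide_eq_false h2, decide_eq_true hm, Bool.not_true, if_true]
          split <;> simp [List.append_assoc]
        · have hmz : ((i : Int) + cte) % 2 = 0 := by omega
          have h2 : ((((i + 1 : Nat)) : Int) + cte) % 2 = 1 := by push_cast; omega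
          simp only [if_pos hmz, decide_eq_true h2, decide_eq_false hm, Bool.not_false,
            Bool.false_eq_true, if_false]
          split <;> simp [List.append_assoc]

-- ===== VERDICT (by name: the statement is the Claim_ definition above) =====
theorem StripToTriangle_spec : Claim_equal_StripToTriangle := by
  intro xs _
  unfold Spec_StripToTriangle
  match xs with
  | [] =>
      rw [StripToTriangle, loopA]
      simp [StripToTriangle_alt, segsGo, triOfSeg]
  | [a] =>
      rw [StripToTriangle, loopA]
      by_cases ha : a = 65535 <;>
        simp [StripToTriangle_alt, segsGo, triOfSeg, ha]
  | a :: b :: rest =>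
      have hA : StripToTriangle (a :: b :: rest) = wA a b false rest := by
        rw [StripToTriangle,
          loopA_eq_wA rest (a :: b :: rest) 2 0 [] (by omega) rfl (Or.inl rfl)]
        simp
      rw [hA, alt_eq]
      obtain ⟨m1, m2, m3⟩ := wA_master rest
      by_cases hb : b = 65535
      · subst hb
        rw [m2 a]
        by_cases ha : a = 65535
        · subst ha
          simp [runT, triOfSeg, restF, tailSegs, segsGo_eq]
        · simp [runT, ha, triOfSeg, restF, tailSegs, segsGo_eq]
      · by_cases ha : a = 65535
        · subst ha
          rw [m3 b hb]
          simp [runT, hb, triOfSeg, restF, tailSegs, segsGo_eq]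
        · have h0 : (false : Bool) = decide (0 % 2 = 1) := by decide
          rw [h0, m1 a b 0 ha hb]
          simp [runT, ha, hb, restF, tailSegs]
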